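-- pv_equiv track=rewrite | github.com/eguar11011/ParserTokenizer | AST/caracteres_repetidos.py | contar_caracteres_repetidos
-- ===== SOURCE A (Python) =====
-- def contar_caracteres_repetidos ( palabra : str ) -> int :
--     pal = palabra . lower ()
--     rep = 0
--     ultimo = len ( pal )
--     v = []
--     for a in range ( ultimo ) :
--         for b in range ( ultimo ) :
--             if a != b :
--                 if ( pal [ a ] == pal [ b ]) and ( pal [ a ] not in v ) :
--                     rep += 1
--                     v.append ( pal [ a ])
--     return rep
-- ===== SOURCE B (Python) =====
-- def contar_caracteres_repetidos(palabra: str) -> int: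
--     s = sorted(palabra.lower())
--     rep = 0
--     run = 1
--     prev = None
--     for c in s:
--         if prev is not None and c == prev:
--             run += 1
--         else:
--             if run >= 2:
--                 rep += 1
--             run = 1
--         prev = c
--     if run >= 2:
--         rep += 1
--     return rep
-- ===== Notes on version B (the rewrite author's own statement) =====
-- stated objective: faster
-- what changed: Replaces the quadratic nested index scan with its growing membership list by sort-then-scan: lowercase, sort the characters, and count maximal runs of length at least 2 in one pass.
import Mathlib
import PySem

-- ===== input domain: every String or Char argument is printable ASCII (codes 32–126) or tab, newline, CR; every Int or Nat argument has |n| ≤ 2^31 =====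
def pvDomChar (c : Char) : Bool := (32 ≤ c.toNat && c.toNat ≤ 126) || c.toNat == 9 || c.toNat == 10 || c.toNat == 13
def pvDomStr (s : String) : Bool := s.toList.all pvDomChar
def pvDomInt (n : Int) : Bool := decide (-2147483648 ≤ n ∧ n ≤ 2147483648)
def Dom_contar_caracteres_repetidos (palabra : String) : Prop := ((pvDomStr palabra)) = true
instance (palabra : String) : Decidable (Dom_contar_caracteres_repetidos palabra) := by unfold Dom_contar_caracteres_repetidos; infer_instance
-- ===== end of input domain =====

-- B replaces A's nested index scan (with a growing 'seen' list) by sorting the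
-- lowercased characters and counting maximal runs of length ≥ 2 in one pass.

-- ===== PORT A =====
-- literal transliteration of A: for a in range(len(pal)): for b in range(len(pal)):
-- if a != b and pal[a] == pal[b] and pal[a] not in v: rep += 1; v.append(pal[a])
def contar_caracteres_repetidos (palabra : String) : Int :=
  (((PySem.List.pyRange 0 (PySem.Str.len (PySem.Str.lower palabra)) 1).foldl
      (fun (st : Int × List Char) a =>
        (PySem.List.pyRange 0 (PySem.Str.len (PySem.Str.lower palabra)) 1).foldl
          (fun (st : Int × List Char) b =>
            if a ≠ b then
              match PySem.Str.pyGet? (PySem.Str.lower palabra) a,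
                    PySem.Str.pyGet? (PySem.Str.lower palabra) b with
              | some ca, some cb =>
                  if ca == cb && !(st.2.contains ca) then (st.1 + 1, st.2 ++ [ca]) else st
              | _, _ => st
            else st) st)
      ((0 : Int), ([] : List Char)))).1

-- ===== PORT B =====
-- B-side helpers: the body of B's single loop (state = (rep, run, prev)) and the
-- trailing "if run >= 2: rep += 1" of Source B
def pvStepB (st : Int × Int × Option Char) (c : Char) : Int × Int × Option Char :=
  match st.2.2 with
  | some p =>
      if c == p then (st.1, st.2.1 + 1, some c)
      else (if st.2.1 ≥ 2 then st.1 + 1 else st.1, 1, some c)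
  | none => (if st.2.1 ≥ 2 then st.1 + 1 else st.1, 1, some c)

def pvFin (st : Int × Int × Option Char) : Int := if st.2.1 ≥ 2 then st.1 + 1 else st.1

-- literal transliteration of B: sort the lowercased characters, scan once
def contar_caracteres_repetidos_alt (palabra : String) : Int :=
  pvFin ((PySem.List.sorted (PySem.Str.lower palabra).toList (fun c => c) false).foldl
    pvStepB ((0 : Int), (1 : Int), (none : Option Char)))

-- ===== PRECONDITION & SPEC =====
def Spec_contar_caracteres_repetidos (palabra : String) (out : Int) : Prop := out = contar_caracteres_repetidos_alt palabra
instance (palabra : String) (out : Int) : Decidable (Spec_contar_caracteres_repetidos palabra out) := by unfold Spec_contar_caracteres_repetidos; infer_instance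

-- ===== CLAIM (what is proved, stated in full; the proofs are below) =====
def Claim_equal_contar_caracteres_repetidos : Prop := ∀ (palabra : String), Dom_contar_caracteres_repetidos palabra → Spec_contar_caracteres_repetidos palabra (contar_caracteres_repetidos palabra)

-- ===== LEMMAS AND PROOFS =====

-- middle spec: number of distinct characters of l that occur at least twice in l
def pvPred (l : List Char) (c : Char) : Bool := decide (2 ≤ l.count c)

def pvNres (l : List Char) : Int := ((PySem.Set.ofList l).countP (pvPred l) : Int)

-- A's inner-loop body, named
def pvInnerStep (l : List Char) (a : Int) (st : Int × List Char) (b : Int) : Int × List Char :=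
  if a ≠ b then
    match PySem.List.pyGet? l a, PySem.List.pyGet? l b with
    | some ca, some cb =>
        if ca == cb && !(st.2.contains ca) then (st.1 + 1, st.2 ++ [ca]) else st
    | _, _ => st
  else st

-- the closed form of A's outer-loop body
def pvStepA (l : List Char) (st : Int × List Char) (c : Char) : Int × List Char :=
  if pvPred l c && !(st.2.contains c) then (st.1 + 1, st.2 ++ [c]) else st

-- two distinct valid positions with the same value give count ≥ 2
lemma pv_two_le_aux (l : List Char) (c : Char) (i j : Nat) (hij : i < j) (hj : j < l.length)
    (hic : l[i]'(Nat.lt_trans hij hj) = c) (hjc : l[j]'hj = c) : 2 ≤ l.count c := by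
  have hdrop : l.drop j = c :: l.drop (j + 1) := by
    rw [List.drop_eq_getElem_cons hj, hjc]
  have hsplit : l.count c = (l.take j).count c + (l.drop j).count c := by
    conv_lhs => rw [← List.take_append_drop j l]
    rw [List.count_append]
  have hmem : c ∈ l.take j := by
    have hlen' : i < (l.take j).length := by simp [List.length_take]; omega
    have h1 : (l.take j)[i] = l[i]'(Nat.lt_trans hij hj) := List.getElem_take
    rw [← hic, ← h1]
    exact List.getElem_mem hlen'
  have h2 := List.count_pos_iff.mpr hmem
  rw [hsplit, hdrop, List.count_cons_self]
  omega

lemma pv_two_le_count_of_idx (l : List Char) (c : Char) (i j : Nat) (hi : i < l.length)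
    (hj : j < l.length) (hij : i ≠ j) (hic : l[i] = c) (hjc : l[j] = c) : 2 ≤ l.count c := by
  rcases Nat.lt_or_ge i j with h | h
  · exact pv_two_le_aux l c i j h hj hic hjc
  · exact pv_two_le_aux l c j i (by omega) hi hjc hic

-- count ≥ 2 gives a second position, distinct from a given one
lemma pv_idx_of_two_le_count (l : List Char) (c : Char) (k : Nat) (hk : k < l.length)
    (hkc : l[k]'hk = c) (h2 : 2 ≤ l.count c) :
    ∃ j : Nat, ∃ hj : j < l.length, j ≠ k ∧ l[j]'hj = c := by
  have hdrop : l.drop k = c :: l.drop (k + 1) := by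
    rw [List.drop_eq_getElem_cons hk, hkc]
  have hsplit : l.count c = (l.take k).count c + (l.drop k).count c := by
    conv_lhs => rw [← List.take_append_drop k l]
    rw [List.count_append]
  rw [hdrop, List.count_cons_self] at hsplit
  rcases Nat.lt_or_ge 0 ((l.take k).count c) with hpos | hzero
  · have hmem : c ∈ l.take k := List.count_pos_iff.mp hpos
    obtain ⟨j, hj, hje⟩ := List.getElem_of_mem hmem
    have hjk : j < k := by simp [List.length_take] at hj; omega
    rw [List.getElem_take] at hje
    exact ⟨j, by omega, by omega, hje⟩
  · have hpos : 0 < (l.drop (k + 1)).count c := by omega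
    have hmem : c ∈ l.drop (k + 1) := List.count_pos_iff.mp hpos
    obtain ⟨j, hj, hje⟩ := List.getElem_of_mem hmem
    have hjlen : k + 1 + j < l.length := by simp [List.length_drop] at hj; omega
    rw [List.getElem_drop] at hje
    exact ⟨k + 1 + j, hjlen, by omega, hje⟩

-- A's inner loop in closed form
lemma pvInner (l : List Char) (a : Int) (ca : Char) (ha : PySem.List.pyGet? l a = some ca) :
    ∀ (bs : List Int) (rep : Int) (v : List Char),
    bs.foldl (pvInnerStep l a) (rep, v)
      = if (bs.any fun b => decide (b ≠ a) && (PySem.List.pyGet? l b == some ca)) && !(v.contains ca)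
        then (rep + 1, v ++ [ca]) else (rep, v)
  | [], rep, v => by simp
  | b :: bs, rep, v => by
    by_cases hab : a = b
    · subst hab
      have hstep : pvInnerStep l a (rep, v) a = (rep, v) := by simp [pvInnerStep]
      rw [List.foldl_cons, hstep, pvInner l a ca ha bs rep v]
      simp [List.any_cons]
    · cases hgb : PySem.List.pyGet? l b with
      | none =>
          have hstep : pvInnerStep l a (rep, v) b = (rep, v) := by
            simp [pvInnerStep, ha, hgb, hab]
          rw [List.foldl_cons, hstep, pvInner l a ca ha bs rep v]
          simp [List.any_cons, hgb]
      | some cb =>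
          by_cases hcb : ca = cb
          · subst hcb
            by_cases hv : ca ∈ v
            · have hstep : pvInnerStep l a (rep, v) b = (rep, v) := by
                simp [pvInnerStep, ha, hgb, hab, hv]
              rw [List.foldl_cons, hstep, pvInner l a ca ha bs rep v]
              simp [hv]
            · have hstep : pvInnerStep l a (rep, v) b = (rep + 1, v ++ [ca]) := by
                simp [pvInnerStep, ha, hgb, hab, hv]
              rw [List.foldl_cons, hstep, pvInner l a ca ha bs (rep + 1) (v ++ [ca])]
              have hba : ¬ b = a := fun h => hab h.symm
              have hneg : ((bs.any fun b' => decide (b' ≠ a) && (PySem.List.pyGet? l b' == some ca))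
                  && !((v ++ [ca]).contains ca)) = false := by simp
              have hpos : (((b :: bs).any fun b' => decide (b' ≠ a) && (PySem.List.pyGet? l b' == some ca))
                  && !(v.contains ca)) = true := by
                simp [List.any_cons, hgb, hv, hba]
              rw [hneg, hpos]
              simp
          · have hbeq : (ca == cb) = false := by simpa using hcb
            have hstep : pvInnerStep l a (rep, v) b = (rep, v) := by
              simp [pvInnerStep, ha, hgb, hbeq, hab]
            rw [List.foldl_cons, hstep, pvInner l a ca ha bs rep v]
            have hterm : (PySem.List.pyGet? l b == some ca) = false := by
              rw [hgb]
              simp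
              exact fun h => hcb h.symm
            simp [List.any_cons, hterm]

-- the existence test of A's inner loop is exactly "count ≥ 2"
lemma pvAnyCount (l : List Char) (c : Char) (k : Nat) (hk : k < l.length) (hkc : l[k] = c) :
    ((PySem.List.pyRange 0 (l.length : Int) 1).any
        fun b => decide (b ≠ (k : Int)) && (PySem.List.pyGet? l b == some c))
      = pvPred l c := by
  rw [Bool.eq_iff_iff]
  simp only [List.any_eq_true, PySem.List.mem_pyRange_one, pvPred, Bool.and_eq_true,
    decide_eq_true_eq, beq_iff_eq]
  constructor
  · rintro ⟨b, ⟨hb0, hblt⟩, hbk, hbeq⟩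
    have hjlt : b.toNat < l.length := by omega
    have hbk' : b = ((b.toNat : Nat) : Int) := (Int.toNat_of_nonneg hb0).symm
    obtain ⟨cb, hcb2⟩ : ∃ x, l[b.toNat] = x := ⟨_, rfl⟩
    have hget : PySem.List.pyGet? l b = some cb := by
      rw [hbk', PySem.List.pyGet?_natCast, List.getElem?_eq_getElem hjlt, hcb2]
    rw [hget] at hbeq
    have hje : cb = c := by injection hbeq
    have hjk : b.toNat ≠ k := by omega
    exact pv_two_le_count_of_idx l c b.toNat k hjlt hk hjk (hcb2.trans hje) hkc
  · intro h2
    obtain ⟨j, hjlt, hjk, hje⟩ := pv_idx_of_two_le_count l c k hk hkc h2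
    refine ⟨(j : Int), ⟨by omega, by omega⟩, by omega, ?_⟩
    rw [PySem.List.pyGet?_natCast, List.getElem?_eq_getElem hjlt, hje]

-- folding A's closed-form step accumulates exactly the fresh duplicated characters
lemma pvAfold (l : List Char) :
    ∀ (rest : List Char) (rep : Int) (v : List Char),
    rest.foldl (pvStepA l) (rep, v)
      = (rep + (((rest.filter (pvPred l)).foldl PySem.Set.add v).length : Int) - (v.length : Int),
         (rest.filter (pvPred l)).foldl PySem.Set.add v)
  | [], rep, v => by simp
  | c :: rest, rep, v => by
    by_cases hp : pvPred l c
    · rw [List.filter_cons, if_pos hp]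
      by_cases hv : c ∈ v
      · have hstep : pvStepA l (rep, v) c = (rep, v) := by simp [pvStepA, hp, hv]
        have hadd : PySem.Set.add v c = v := by simp [PySem.Set.add, hv]
        rw [List.foldl_cons, hstep, List.foldl_cons, hadd, pvAfold l rest rep v]
      · have hstep : pvStepA l (rep, v) c = (rep + 1, v ++ [c]) := by simp [pvStepA, hp, hv]
        have hadd : PySem.Set.add v c = v ++ [c] := by simp [PySem.Set.add, hv]
        rw [List.foldl_cons, hstep, List.foldl_cons, hadd, pvAfold l rest (rep + 1) (v ++ [c])]
        simp only [Prod.mk.injEq]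
        refine ⟨?_, trivial⟩
        simp only [List.length_append, List.length_cons, List.length_nil]
        push_cast
        ring
    · have hp' : pvPred l c = false := by simpa using hp
      have hstep : pvStepA l (rep, v) c = (rep, v) := by simp [pvStepA, hp']
      have hf : (c :: rest).filter (pvPred l) = rest.filter (pvPred l) := by
        simp [hp']
      rw [hf, List.foldl_cons, hstep, pvAfold l rest rep v]

-- two Nodup lists with the same members have the same countP
lemma pvCountPExt (u w : List Char) (hu : u.Nodup) (hw : w.Nodup)
    (h : ∀ c, c ∈ u ↔ c ∈ w) (p : Char → Bool) : u.countP p = w.countP p :=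
  ((List.perm_ext_iff_of_nodup hu hw).mpr h).countP_eq p

-- peel the head's whole duplicate class off pvNres
lemma pvNresPeel (c : Char) (t : List Char) :
    pvNres (c :: t) = (if 2 ≤ 1 + t.count c then 1 else 0) + pvNres (t.filter (fun d => !(d == c))) := by
  have hnodup_w : (c :: PySem.Set.ofList (t.filter (fun d => !(d == c)))).Nodup := by
    refine List.nodup_cons.mpr ⟨?_, PySem.Set.nodup_ofList _⟩
    intro hmem
    rw [PySem.Set.mem_ofList, List.mem_filter] at hmem
    simp at hmem
  have hmemext : ∀ d, d ∈ PySem.Set.ofList (c :: t) ↔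
      d ∈ c :: PySem.Set.ofList (t.filter (fun d => !(d == c))) := by
    intro d
    rw [PySem.Set.mem_ofList]
    by_cases hdc : d = c
    · subst hdc; simp
    · simp [PySem.Set.mem_ofList, List.mem_filter, hdc]
  have hcount : (PySem.Set.ofList (c :: t)).countP (pvPred (c :: t))
      = (c :: PySem.Set.ofList (t.filter (fun d => !(d == c)))).countP (pvPred (c :: t)) :=
    pvCountPExt _ _ (PySem.Set.nodup_ofList _) hnodup_w hmemext _
  have hcongr : (PySem.Set.ofList (t.filter (fun d => !(d == c)))).countP (pvPred (c :: t))
      = (PySem.Set.ofList (t.filter (fun d => !(d == c)))).countP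
          (pvPred (t.filter (fun d => !(d == c)))) := by
    apply List.countP_congr
    intro d hd
    rw [PySem.Set.mem_ofList, List.mem_filter] at hd
    obtain ⟨hdt, hdc⟩ := hd
    have hdc' : d ≠ c := by simpa using hdc
    have h1 : (c :: t).count d = t.count d := by
      have hcd : ¬ c = d := fun h => hdc' h.symm
      rw [List.count_cons]
      simp [hcd]
    have h2 : (t.filter (fun d => !(d == c))).count d = t.count d :=
      List.count_filter (by simp [hdc'])
    simp [pvPred, h1, h2]
  have hhead : pvPred (c :: t) c = decide (2 ≤ 1 + t.count c) := by
    unfold pvPred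
    rw [List.count_cons_self]
    exact decide_eq_decide.mpr (by omega)
  unfold pvNres
  rw [hcount, List.countP_cons, hcongr, hhead]
  by_cases h2 : 2 ≤ 1 + t.count c
  · rw [if_pos (by simpa using h2), if_pos h2]
    push_cast
    ring
  · rw [if_neg (by simpa using h2), if_neg h2]
    push_cast
    ring

-- pvNres is invariant under permutation
lemma pvNresPerm (u w : List Char) (h : u.Perm w) : pvNres u = pvNres w := by
  unfold pvNres
  have h1 : (PySem.Set.ofList u).countP (pvPred u) = (PySem.Set.ofList w).countP (pvPred u) :=
    pvCountPExt _ _ (PySem.Set.nodup_ofList _) (PySem.Set.nodup_ofList _)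
      (fun c => by rw [PySem.Set.mem_ofList, PySem.Set.mem_ofList, h.mem_iff]) _
  have h2 : (PySem.Set.ofList w).countP (pvPred u) = (PySem.Set.ofList w).countP (pvPred w) :=
    List.countP_congr (fun d _ => by simp [pvPred, h.count_eq])
  rw [h1, h2]

-- B's scan over a sorted tail, in closed form
lemma pvBscan :
    ∀ (s : List Char) (rep run : Int) (p : Char), 1 ≤ run → (p :: s).Pairwise (· ≤ ·) →
    pvFin (s.foldl pvStepB (rep, run, some p))
      = rep + (if 2 ≤ run + (s.count p : Int) then 1 else 0)
          + pvNres (s.filter (fun d => !(d == p)))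
  | [], rep, run, p, hrun, hsort => by
    simp only [List.foldl_nil, List.filter_nil, List.count_nil, pvFin]
    have hnil : pvNres [] = 0 := by decide
    rw [hnil]
    push_cast
    split_ifs <;> omega
  | c :: t, rep, run, p, hrun, hsort => by
    rw [List.pairwise_cons] at hsort
    obtain ⟨hple, hct⟩ := hsort
    by_cases hcp : c = p
    · subst hcp
      have hstep : pvStepB (rep, run, some c) c = (rep, run + 1, some c) := by
        simp [pvStepB]
      rw [List.foldl_cons, hstep, pvBscan t rep (run + 1) c (by omega) hct]
      have hcount : ((c :: t).count c : Int) = (t.count c : Int) + 1 := by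
        rw [List.count_cons_self]; push_cast; ring
      have hfilter : (c :: t).filter (fun d => !(d == c)) = t.filter (fun d => !(d == c)) := by
        simp
      rw [hcount, hfilter]
      have harith : run + 1 + (t.count c : Int) = run + ((t.count c : Int) + 1) := by ring
      rw [harith]
    · have hbe : (c == p) = false := by simpa using hcp
      have hstep : pvStepB (rep, run, some p) c
          = ((if run ≥ 2 then rep + 1 else rep), 1, some c) := by
        simp [pvStepB, hbe]
      rw [List.foldl_cons, hstep, pvBscan t (if run ≥ 2 then rep + 1 else rep) 1 c (by omega) hct]
      have hpc : p < c := lt_of_le_of_ne (hple c (by simp)) (fun h => hcp h.symm)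
      rw [List.pairwise_cons] at hct
      have hnot : p ∉ c :: t := by
        intro hmem
        rcases List.mem_cons.mp hmem with h | h
        · exact hcp h.symm
        · exact absurd (le_antisymm (hct.1 p h) (le_of_lt hpc)) hcp
      have hcnt0 : (c :: t).count p = 0 := List.count_eq_zero_of_not_mem hnot
      have hfid : (c :: t).filter (fun d => !(d == p)) = c :: t := by
        rw [List.filter_eq_self]
        intro d hd
        simp only [Bool.not_eq_eq_eq_not, Bool.not_true, beq_eq_false_iff_ne, ne_eq]
        intro hdp; subst hdp; exact hnot hd
      rw [hcnt0, hfid, pvNresPeel c t]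
      generalize pvNres (t.filter (fun d => !(d == c))) = N
      push_cast
      split_ifs <;> omega

-- A computes pvNres of the lowercased characters
lemma pvAeq (palabra : String) :
    contar_caracteres_repetidos palabra = pvNres (PySem.Chars.lower palabra.toList) := by
  unfold contar_caracteres_repetidos
  have hget : ∀ i : Int, PySem.Str.pyGet? (PySem.Str.lower palabra) i
      = PySem.List.pyGet? (PySem.Chars.lower palabra.toList) i := by
    intro i; simp [PySem.Str.pyGet?, PySem.Str.lower]
  have hlen : PySem.Str.len (PySem.Str.lower palabra)
      = ((PySem.Chars.lower palabra.toList).length : Int) := by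
    rw [PySem.Str.len_eq]
    simp [PySem.Str.lower]
  rw [hlen]
  simp only [hget]
  generalize PySem.Chars.lower palabra.toList = l
  have hstepfun : ∀ a : Int,
      (fun (st : Int × List Char) b =>
        if a ≠ b then
          match PySem.List.pyGet? l a, PySem.List.pyGet? l b with
          | some ca, some cb =>
              if ca == cb && !(st.2.contains ca) then (st.1 + 1, st.2 ++ [ca]) else st
          | _, _ => st
        else st) = pvInnerStep l a := fun a => rfl
  simp only [hstepfun]
  have houter :
      (PySem.List.pyRange 0 (l.length : Int) 1).foldl
          (fun (st : Int × List Char) a =>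
            (PySem.List.pyRange 0 (l.length : Int) 1).foldl (pvInnerStep l a) st)
          ((0 : Int), ([] : List Char))
      = (PySem.List.pyRange 0 (l.length : Int) 1).foldl
          (fun (st : Int × List Char) a => pvStepA l st (PySem.List.pyGetD l a ' '))
          ((0 : Int), ([] : List Char)) := by
    apply PySem.List.foldl_congr_mem
    rintro ⟨rep, v⟩ a hmem
    rw [PySem.List.mem_pyRange_one] at hmem
    obtain ⟨ha0, halt⟩ := hmem
    have hklt : a.toNat < l.length := by omega
    have hak : a = ((a.toNat : Nat) : Int) := (Int.toNat_of_nonneg ha0).symm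
    obtain ⟨ca, hca⟩ : ∃ c, l[a.toNat] = c := ⟨_, rfl⟩
    have hga : PySem.List.pyGet? l a = some ca := by
      rw [hak, PySem.List.pyGet?_natCast, List.getElem?_eq_getElem hklt, hca]
    have hgd : PySem.List.pyGetD l a ' ' = ca := by
      rw [hak, PySem.List.pyGetD_natCast, List.getD_eq_getElem l ' ' hklt, hca]
    have hany : ((PySem.List.pyRange 0 (l.length : Int) 1).any
        fun b => decide (b ≠ a) && (PySem.List.pyGet? l b == some ca)) = pvPred l ca := by
      rw [← pvAnyCount l ca a.toNat hklt hca]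
      congr 1
      funext b
      rw [← hak]
    rw [pvInner l a ca hga (PySem.List.pyRange 0 (l.length : Int) 1) rep v, hgd]
    rw [hany, pvStepA]
  rw [houter,
    PySem.List.foldl_pyRange_zero_pyGetD' l ' ' (pvStepA l) ((0 : Int), ([] : List Char)),
    pvAfold l l 0 []]
  dsimp only
  simp only [List.length_nil, Nat.cast_zero, sub_zero, zero_add]
  rw [← PySem.Set.ofList_eq_foldl]
  unfold pvNres
  rw [List.countP_eq_length_filter]
  have hperm : (PySem.Set.ofList (l.filter (pvPred l))).Perm ((PySem.Set.ofList l).filter (pvPred l)) := by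
    apply (List.perm_ext_iff_of_nodup (PySem.Set.nodup_ofList _)
      ((PySem.Set.nodup_ofList l).filter _)).mpr
    intro c
    rw [PySem.Set.mem_ofList, List.mem_filter, List.mem_filter, PySem.Set.mem_ofList]
  rw [hperm.length_eq]

-- B computes pvNres of the lowercased characters
lemma pvBeq (palabra : String) :
    contar_caracteres_repetidos_alt palabra = pvNres (PySem.Chars.lower palabra.toList) := by
  unfold contar_caracteres_repetidos_alt
  have hpal : (PySem.Str.lower palabra).toList = PySem.Chars.lower palabra.toList := by
    simp [PySem.Str.lower]
  rw [hpal]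
  generalize PySem.Chars.lower palabra.toList = l
  cases hsv : PySem.List.sorted l (fun c => c) false with
  | nil =>
      have hlnil : l = [] := (PySem.List.sorted_eq_nil_iff l _ false).mp hsv
      rw [hlnil]
      decide
  | cons c t =>
      have hperm := PySem.List.sorted_perm l (fun c : Char => c) false
      rw [hsv] at hperm
      have hpair : (c :: t).Pairwise (· ≤ ·) := by
        have hp := PySem.List.sorted_pairwise l (fun c : Char => c)
        rw [hsv] at hp
        exact hp
      rw [List.foldl_cons]
      have hstep0 : pvStepB ((0 : Int), (1 : Int), (none : Option Char)) c
          = ((0 : Int), (1 : Int), some c) := by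
        norm_num [pvStepB]
      rw [hstep0, pvBscan t 0 1 c (by norm_num) hpair]
      rw [pvNresPerm l (c :: t) hperm.symm, pvNresPeel c t]
      generalize pvNres (t.filter (fun d => !(d == c))) = N
      split_ifs <;> omega

-- ===== VERDICT (by name: the statement is the Claim_ definition above) =====
theorem contar_caracteres_repetidos_spec : Claim_equal_contar_caracteres_repetidos := by
  intro palabra _
  unfold Spec_contar_caracteres_repetidos
  rw [pvAeq, pvBeq]
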